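-- pv_equiv track=rewrite | github.com/vaderkvarn/aoc19 | 15/both.py | map_from_coords
-- ===== SOURCE A (Python) =====
-- def map_from_coords(coords):
--     ps = coords.keys()
--     min_x = min([p[0] for p in ps])
--     max_x = max([p[0] for p in ps])
--     min_y = min([p[1] for p in ps])
--     max_y = max([p[1] for p in ps])
--     m = [[' ' for x in range((max_x - min_x) + 1)] for y in range((max_y - min_y) + 1)]
--     for i in range((max_y - min_y) + 1):
--         for j in range((max_x - min_x) + 1):
--             p = (min_x + j, min_y + i)
--             if p in coords:
--                 m[i][j] = coords[p]
--     return m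
-- ===== SOURCE B (Python) =====
-- def map_from_coords(coords):
--     min_x = min(x for x, y in coords)
--     max_x = max(x for x, y in coords)
--     min_y = min(y for x, y in coords)
--     max_y = max(y for x, y in coords)
--     m = [[' '] * (max_x - min_x + 1) for _ in range(max_y - min_y + 1)]
--     for (x, y), v in coords.items():
--         m[y - min_y][x - min_x] = v
--     return m
-- ===== Notes on version B (the rewrite author's own statement) =====
-- stated objective: simpler
-- what changed: Instead of scanning every grid cell and testing membership of its coordinate in the dict, B makes one pass over the dict items and scatters each value into its cell of the blank grid.
import Mathlib
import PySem

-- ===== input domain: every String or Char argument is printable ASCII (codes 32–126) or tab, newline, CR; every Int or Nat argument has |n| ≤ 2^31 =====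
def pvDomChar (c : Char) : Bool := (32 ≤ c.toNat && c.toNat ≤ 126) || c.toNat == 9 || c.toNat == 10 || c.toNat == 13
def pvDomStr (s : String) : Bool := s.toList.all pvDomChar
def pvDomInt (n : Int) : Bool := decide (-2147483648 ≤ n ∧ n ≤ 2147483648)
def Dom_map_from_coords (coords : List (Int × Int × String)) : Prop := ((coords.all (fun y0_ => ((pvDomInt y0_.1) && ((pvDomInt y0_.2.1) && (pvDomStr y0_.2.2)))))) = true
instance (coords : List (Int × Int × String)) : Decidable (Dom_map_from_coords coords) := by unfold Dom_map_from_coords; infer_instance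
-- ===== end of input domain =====

-- B fills the grid by one pass over the dict items (scatter) instead of A's scan over every
-- grid cell with a membership test (gather); same return value, objective: simpler.

-- ===== PORT A =====
-- shared helper: Python's `m[i][j] = v` (exact here: every use has 0 ≤ i, j in range)
def pvCellSet (m : List (List String)) (i j : Int) (v : String) : List (List String) :=
  PySem.List.pySetD m i (PySem.List.pySetD (PySem.List.pyGetD m i []) j v)

-- A's dict parameter arrives as its items ((x, y), value) flattened to (x, y, value), in
-- insertion order; `p in coords` / `coords[p]` are PySem.Dict lookups over those items.
def map_from_coords (coords : List (Int × Int × String)) : List (List String) :=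
  let ps := coords.map (fun e => (e.1, e.2.1))
  match PySem.List.min? (ps.map (fun p => p.1)) (fun x => x),
        PySem.List.max? (ps.map (fun p => p.1)) (fun x => x),
        PySem.List.min? (ps.map (fun p => p.2)) (fun x => x),
        PySem.List.max? (ps.map (fun p => p.2)) (fun x => x) with
  | some min_x, some max_x, some min_y, some max_y =>
      let d : PySem.Dict (Int × Int) String := ⟨coords.map (fun e => ((e.1, e.2.1), e.2.2))⟩
      let m0 := (PySem.List.pyRange 0 ((max_y - min_y) + 1) 1).map (fun _ =>
                (PySem.List.pyRange 0 ((max_x - min_x) + 1) 1).map (fun _ => " "))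
      (PySem.List.pyRange 0 ((max_y - min_y) + 1) 1).foldl (fun m i =>
        (PySem.List.pyRange 0 ((max_x - min_x) + 1) 1).foldl (fun m j =>
          match PySem.Dict.get? d (min_x + j, min_y + i) with
          | some v => pvCellSet m i j v
          | none => m) m) m0
  | _, _, _, _ => []  -- unreachable under Pre_ (min() of an empty sequence raises ValueError)

-- ===== PORT B =====
def map_from_coords_alt (coords : List (Int × Int × String)) : List (List String) :=
  match PySem.List.min? (coords.map (fun e => e.1)) (fun x => x) with
  | none => []  -- unreachable under Pre_ (min() of an empty sequence raises ValueError)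
  | some min_x =>
  match PySem.List.max? (coords.map (fun e => e.1)) (fun x => x) with
  | none => []
  | some max_x =>
  match PySem.List.min? (coords.map (fun e => e.2.1)) (fun x => x) with
  | none => []
  | some min_y =>
  match PySem.List.max? (coords.map (fun e => e.2.1)) (fun x => x) with
  | none => []
  | some max_y =>
      let m0 := (PySem.List.pyRange 0 ((max_y - min_y) + 1) 1).map (fun _ =>
                 PySem.List.pyRepeat [" "] ((max_x - min_x) + 1))
      coords.foldl (fun m e =>  -- m[y - min_y][x - min_x] = v
        PySem.List.pySetD m (e.2.1 - min_y)
          (PySem.List.pySetD (PySem.List.pyGetD m (e.2.1 - min_y) []) (e.1 - min_x) e.2.2)) m0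

-- ===== PRECONDITION & SPEC =====
-- Pre_ excludes the empty dict, on which A raises ValueError (min of an empty sequence), and
-- items lists with duplicate (x, y) keys, which a Python dict cannot contain.
def Pre_map_from_coords (coords : List (Int × Int × String)) : Prop :=
  coords ≠ [] ∧ (coords.map (fun e => (e.1, e.2.1))).Nodup
instance (coords : List (Int × Int × String)) : Decidable (Pre_map_from_coords coords) := by
  unfold Pre_map_from_coords; infer_instance

def pvWitness_map_from_coords : (List (Int × Int × String)) := [(0, 0, "#"), (2, 1, ".")]

def Spec_map_from_coords (coords : List (Int × Int × String)) (out : List (List String)) : Prop := out = map_from_coords_alt coords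
instance (coords : List (Int × Int × String)) (out : List (List String)) : Decidable (Spec_map_from_coords coords out) := by unfold Spec_map_from_coords; infer_instance

-- ===== CLAIM (what is proved, stated in full; the proofs are below) =====
def Claim_equal_map_from_coords : Prop := ∀ (coords : List (Int × Int × String)), Dom_map_from_coords coords → Pre_map_from_coords coords → Spec_map_from_coords coords (map_from_coords coords)

-- ===== LEMMAS AND PROOFS =====

-- the canonical H×W grid whose cell (row i, column j) holds g i j
def pvGrid (H W : Int) (g : Int → Int → String) : List (List String) :=
  (PySem.List.pyRange 0 H 1).map (fun i => (PySem.List.pyRange 0 W 1).map (fun j => g i j))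

-- last-match lookup of key k among the items (the value B's scatter pass leaves in k's cell)
def pvLook (cs : List (Int × Int × String)) (k : Int × Int) : Option String :=
  (cs.reverse.find? (fun e => (e.1, e.2.1) == k)).map (fun e => e.2.2)

theorem pvGrid_congr {H W : Int} {g g' : Int → Int → String}
    (h : ∀ i j, 0 ≤ i → i < H → 0 ≤ j → j < W → g i j = g' i j) :
    pvGrid H W g = pvGrid H W g' := by
  apply List.map_congr_left
  intro i hi
  rw [PySem.List.mem_pyRange_one] at hi
  apply List.map_congr_left
  intro j hj
  rw [PySem.List.mem_pyRange_one] at hj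
  exact h i j hi.1 hi.2 hj.1 hj.2

theorem pv_set_map_pyRange {α : Type} (f : Int → α) (n k : Int) (hk : 0 ≤ k) (v : α) :
    ((PySem.List.pyRange 0 n 1).map f).set k.toNat v
      = (PySem.List.pyRange 0 n 1).map (fun x => if x = k then v else f x) := by
  apply List.ext_getElem
  · simp
  · intro m h1 h2
    simp only [List.getElem_set, List.getElem_map, PySem.List.getElem_pyRange_one]
    by_cases hc : k.toNat = m
    · simp [hc, show (0 : Int) + m = k by omega]
    · rw [if_neg hc, if_neg (by omega)]

theorem pvCellSet_grid (H W i0 j0 : Int) (g : Int → Int → String) (v : String)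
    (hi : 0 ≤ i0) (hi2 : i0 < H) (hj : 0 ≤ j0) (_hj2 : j0 < W) :
    pvCellSet (pvGrid H W g) i0 j0 v
      = pvGrid H W (fun i j => if i = i0 ∧ j = j0 then v else g i j) := by
  unfold pvCellSet pvGrid
  rw [PySem.List.pyGetD_map_pyRange_of_nonneg _ _ _ _ hi hi2]
  rw [PySem.List.pySetD_of_nonneg _ _ hj, pv_set_map_pyRange _ _ _ hj,
      PySem.List.pySetD_of_nonneg _ _ hi, pv_set_map_pyRange _ _ _ hi]
  apply List.map_congr_left
  intro i hmem
  by_cases hc : i = i0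
  · subst hc
    rw [if_pos rfl]
    apply List.map_congr_left
    intro j _
    by_cases hcj : j = j0 <;> simp [hcj]
  · simp only [if_neg hc]
    apply List.map_congr_left
    intro j _
    simp [hc]


theorem pv_find?_reverse (cs : List (Int × Int × String)) (k : Int × Int)
    (hnd : (cs.map (fun e => (e.1, e.2.1))).Nodup) :
    cs.reverse.find? (fun e => (e.1, e.2.1) == k) = cs.find? (fun e => (e.1, e.2.1) == k) := by
  induction cs with
  | nil => rfl
  | cons e t ih =>
    simp only [List.map_cons, List.nodup_cons] at hnd
    simp only [List.reverse_cons, List.find?_append, List.find?_cons]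
    by_cases hp : ((e.1, e.2.1) == k) = true
    · have hk : (e.1, e.2.1) = k := beq_iff_eq.mp hp
      have hnone : t.reverse.find? (fun e' => (e'.1, e'.2.1) == k) = none := by
        rw [List.find?_eq_none]
        intro x hx hpx
        exact hnd.1 (by rw [hk, ← beq_iff_eq.mp hpx]; exact List.mem_map_of_mem (List.mem_reverse.mp hx))
      rw [hnone, hp]
      simp
    · rw [ih hnd.2]
      simp only [Bool.not_eq_true] at hp
      rw [hp]
      cases hf : t.find? (fun e' => (e'.1, e'.2.1) == k) <;> simp

theorem pvLook_eq_get? (cs : List (Int × Int × String)) (k : Int × Int)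
    (hnd : (cs.map (fun e => (e.1, e.2.1))).Nodup) :
    pvLook cs k = PySem.Dict.get? (⟨cs.map (fun e => ((e.1, e.2.1), e.2.2))⟩ : PySem.Dict (Int × Int) String) k := by
  unfold pvLook
  rw [pv_find?_reverse cs k hnd]
  simp only [PySem.Dict.get?, List.find?_map]
  cases hf : cs.find? (fun e => (e.1, e.2.1) == k) with
  | none =>
    have : cs.find? ((fun p => p.1 == k) ∘ (fun e => ((e.1, e.2.1), e.2.2))) = none := by
      rw [List.find?_eq_none] at hf ⊢; exact fun x hx => hf x hx
    simp [this]
  | some e =>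
    have : cs.find? ((fun p => p.1 == k) ∘ (fun e => ((e.1, e.2.1), e.2.2))) = some e := by
      simpa [Function.comp] using hf
    simp [this]

theorem pvB_fold (min_x max_x min_y max_y : Int) (cs : List (Int × Int × String))
    (g : Int → Int → String)
    (hb : ∀ e ∈ cs, min_x ≤ e.1 ∧ e.1 ≤ max_x ∧ min_y ≤ e.2.1 ∧ e.2.1 ≤ max_y) :
    cs.foldl (fun m e =>
        PySem.List.pySetD m (e.2.1 - min_y)
          (PySem.List.pySetD (PySem.List.pyGetD m (e.2.1 - min_y) []) (e.1 - min_x) e.2.2))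
        (pvGrid ((max_y - min_y) + 1) ((max_x - min_x) + 1) g)
      = pvGrid ((max_y - min_y) + 1) ((max_x - min_x) + 1)
          (fun i j => (pvLook cs (min_x + j, min_y + i)).getD (g i j)) := by
  have hBA : (fun (m : List (List String)) (e : Int × Int × String) =>
      PySem.List.pySetD m (e.2.1 - min_y)
        (PySem.List.pySetD (PySem.List.pyGetD m (e.2.1 - min_y) []) (e.1 - min_x) e.2.2))
      = (fun m e => pvCellSet m (e.2.1 - min_y) (e.1 - min_x) e.2.2) := rfl
  rw [hBA]
  induction cs generalizing g with
  | nil => simp [pvLook]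
  | cons e t ih =>
    have hbe := hb e (List.mem_cons_self ..)
    rw [List.foldl_cons,
        pvCellSet_grid _ _ _ _ g e.2.2 (by omega) (by omega) (by omega) (by omega),
        ih _ (fun x hx => hb x (List.mem_cons_of_mem _ hx))]
    apply pvGrid_congr
    intro i j hi hi2 hj hj2
    have hsplit : pvLook (e :: t) (min_x + j, min_y + i)
        = (pvLook t (min_x + j, min_y + i)).or
            (if (e.1, e.2.1) = (min_x + j, min_y + i) then some e.2.2 else none) := by
      unfold pvLook
      rw [List.reverse_cons, List.find?_append]
      cases hf : t.reverse.find? (fun x => (x.1, x.2.1) == (min_x + j, min_y + i)) with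
      | none =>
        simp only [Option.or, Option.map]
        by_cases hc : (e.1, e.2.1) = (min_x + j, min_y + i)
        · simp [hc]
        · simp [hc, beq_eq_false_iff_ne.mpr hc]
      | some x => simp
    rw [hsplit]
    cases hl : pvLook t (min_x + j, min_y + i) with
    | some v => simp
    | none =>
      by_cases hc : i = e.2.1 - min_y ∧ j = e.1 - min_x
      · rw [if_pos hc, if_pos (by rw [Prod.ext_iff]; constructor <;> simp <;> omega)]
        simp
      · rw [if_neg hc, if_neg (by intro h; injection h with h1 h2; exact hc ⟨by omega, by omega⟩)]
        simp

theorem pvA_inner (d : PySem.Dict (Int × Int) String) (min_x min_y H W : Int) (i0 : Int)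
    (hi : 0 ≤ i0) (hi2 : i0 < H) (n : Nat) (hn : (n : Int) ≤ W) (g : Int → Int → String) :
    (PySem.List.pyRange 0 (n : Int) 1).foldl (fun m j =>
        match PySem.Dict.get? d (min_x + j, min_y + i0) with
        | some v => pvCellSet m i0 j v
        | none => m) (pvGrid H W g)
      = pvGrid H W (fun i j =>
          if i = i0 ∧ 0 ≤ j ∧ j < (n : Int) then
            (PySem.Dict.get? d (min_x + j, min_y + i)).getD (g i j)
          else g i j) := by
  induction n with
  | zero =>
    rw [show ((0 : Nat) : Int) = 0 by rfl, PySem.List.pyRange_one_eq_nil (by omega), List.foldl_nil]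
    apply pvGrid_congr
    intro i j _ _ _ _
    rw [if_neg (by omega)]
  | succ n ih =>
    rw [show ((n + 1 : Nat) : Int) = (n : Int) + 1 by push_cast; ring,
        PySem.List.pyRange_one_succ_right (by positivity), List.foldl_append, List.foldl_cons,
        List.foldl_nil, ih (by omega)]
    cases hf : PySem.Dict.get? d (min_x + (n : Int), min_y + i0) with
    | none =>
      dsimp only
      apply pvGrid_congr
      intro i j hi' hi2' hj hj2
      by_cases hc : i = i0 ∧ 0 ≤ j ∧ j < (n : Int) + 1
      · by_cases hc2 : j < (n : Int)
        · rw [if_pos hc, if_pos ⟨hc.1, hc.2.1, hc2⟩]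
        · have hj' : j = (n : Int) := by omega
          rw [if_pos hc, if_neg (by omega), hc.1, hj', hf]
          rfl
      · rw [if_neg hc, if_neg (by omega)]
    | some v =>
      dsimp only
      rw [pvCellSet_grid _ _ _ _ _ _ hi hi2 (by positivity) (by push_cast at hn; omega)]
      apply pvGrid_congr
      intro i j hi' hi2' hj hj2
      by_cases hc : i = i0 ∧ j = (n : Int)
      · obtain ⟨h1, h2⟩ := hc
        subst h1; subst h2
        rw [if_pos ⟨rfl, rfl⟩, if_pos ⟨rfl, by omega, by omega⟩, hf]
        rfl
      · rw [if_neg hc]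
        by_cases hc2 : i = i0 ∧ 0 ≤ j ∧ j < (n : Int)
        · rw [if_pos hc2, if_pos ⟨hc2.1, hc2.2.1, by omega⟩]
        · rw [if_neg hc2, if_neg (by
            rintro ⟨rfl, h0, hlt⟩
            rcases lt_or_eq_of_le (Int.lt_add_one_iff.mp hlt) with h | h
            · exact hc2 ⟨rfl, h0, h⟩
            · exact hc ⟨rfl, h⟩)]

theorem pvA_outer (d : PySem.Dict (Int × Int) String) (min_x min_y H W : Int)
    (hW : 0 ≤ W) (n : Nat) (hn : (n : Int) ≤ H) (g : Int → Int → String) :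
    (PySem.List.pyRange 0 (n : Int) 1).foldl (fun m i =>
        (PySem.List.pyRange 0 W 1).foldl (fun m j =>
          match PySem.Dict.get? d (min_x + j, min_y + i) with
          | some v => pvCellSet m i j v
          | none => m) m) (pvGrid H W g)
      = pvGrid H W (fun i j =>
          if 0 ≤ i ∧ i < (n : Int) then
            (PySem.Dict.get? d (min_x + j, min_y + i)).getD (g i j)
          else g i j) := by
  induction n generalizing g with
  | zero =>
    rw [show ((0 : Nat) : Int) = 0 by rfl, PySem.List.pyRange_one_eq_nil (le_refl (0 : Int)),
        List.foldl_nil]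
    apply pvGrid_congr
    intro i j _ _ _ _
    rw [if_neg (by omega)]
  | succ n ih =>
    rw [show ((n + 1 : Nat) : Int) = (n : Int) + 1 by push_cast; ring,
        PySem.List.pyRange_one_succ_right (by positivity), List.foldl_append, List.foldl_cons,
        List.foldl_nil, ih (by omega)]
    have hinner := pvA_inner d min_x min_y H W (n : Int) (by positivity) (by omega)
        W.toNat (by omega) (fun i j =>
          if 0 ≤ i ∧ i < (n : Int) then
            (PySem.Dict.get? d (min_x + j, min_y + i)).getD (g i j)
          else g i j)
    rw [show ((W.toNat : Nat) : Int) = W by omega] at hinner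
    rw [hinner]
    apply pvGrid_congr
    intro i j hi' hi2' hj hj2
    by_cases hc : i = (n : Int)
    · rw [if_pos ⟨hc, hj, hj2⟩, if_neg (show ¬(0 ≤ i ∧ i < (n : Int)) by omega),
          if_pos (show 0 ≤ i ∧ i < (n : Int) + 1 by omega)]
    · rw [if_neg (by omega)]
      by_cases hc2 : 0 ≤ i ∧ i < (n : Int)
      · rw [if_pos hc2, if_pos (by omega)]
      · rw [if_neg hc2, if_neg (by omega)]

-- ===== VERDICT (by name: the statement is the Claim_ definition above) =====
theorem map_from_coords_spec : Claim_equal_map_from_coords := by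
  unfold Claim_equal_map_from_coords Spec_map_from_coords Pre_map_from_coords
  intro coords _ hpre
  obtain ⟨hne, hnd⟩ := hpre
  have hxs : ((coords.map (fun e => (e.1, e.2.1))).map (fun p : Int × Int => p.1))
      = coords.map (fun e => e.1) := by simp
  have hys : ((coords.map (fun e => (e.1, e.2.1))).map (fun p : Int × Int => p.2))
      = coords.map (fun e => e.2.1) := by simp
  unfold map_from_coords map_from_coords_alt
  simp only [hxs, hys]
  cases hminx : PySem.List.min? (coords.map (fun e => e.1)) (fun x => x) with
  | none => rw [PySem.List.min?_eq_none_iff] at hminx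
  | some min_x =>
  cases hmaxx : PySem.List.max? (coords.map (fun e => e.1)) (fun x => x) with
  | none => rw [PySem.List.max?_eq_none_iff] at hmaxx
  | some max_x =>
  cases hminy : PySem.List.min? (coords.map (fun e => e.2.1)) (fun x => x) with
  | none => rw [PySem.List.min?_eq_none_iff] at hminy
  | some min_y =>
  cases hmaxy : PySem.List.max? (coords.map (fun e => e.2.1)) (fun x => x) with
  | none => rw [PySem.List.max?_eq_none_iff] at hmaxy
  | some max_y =>
  dsimp only
  -- bounds
  have hbx : ∀ e ∈ coords, min_x ≤ e.1 ∧ e.1 ≤ max_x ∧ min_y ≤ e.2.1 ∧ e.2.1 ≤ max_y := by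
    intro e he
    refine ⟨PySem.List.min?_isMin hminx e.1 (List.mem_map_of_mem he),
            PySem.List.max?_isMax hmaxx e.1 (List.mem_map_of_mem he),
            PySem.List.min?_isMin hminy e.2.1 (List.mem_map_of_mem he),
            PySem.List.max?_isMax hmaxy e.2.1 (List.mem_map_of_mem he)⟩
  have hxm := PySem.List.max?_mem hmaxx
  have hym := PySem.List.max?_mem hmaxy
  obtain ⟨ex, hex, hex2⟩ := List.mem_map.mp hxm
  obtain ⟨ey, hey, hey2⟩ := List.mem_map.mp hym
  have hWx : min_x ≤ max_x := by
    have := (hbx ex hex).1; omega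
  have hWy : min_y ≤ max_y := by
    have := (hbx ey hey).2.2.1; omega
  set H := (max_y - min_y) + 1 with hH
  set W := (max_x - min_x) + 1 with hW
  -- both blank grids are pvGrid H W (const " ")
  have hblankA : (PySem.List.pyRange 0 H 1).map (fun _ =>
      (PySem.List.pyRange 0 W 1).map (fun _ => " ")) = pvGrid H W (fun _ _ => " ") := rfl
  have hblankB : (PySem.List.pyRange 0 H 1).map (fun _ =>
      PySem.List.pyRepeat [" "] W) = pvGrid H W (fun _ _ => " ") := by
    unfold pvGrid
    apply List.map_congr_left
    intro i _
    rw [PySem.List.pyRepeat_singleton]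
    simp [PySem.List.length_pyRange_one]
  rw [hblankA, hblankB]
  -- A side
  have hA := pvA_outer ⟨coords.map (fun e => ((e.1, e.2.1), e.2.2))⟩ min_x min_y H W
      (by omega) H.toNat (by omega) (fun _ _ => " ")
  rw [show ((H.toNat : Nat) : Int) = H by omega] at hA
  rw [hA]
  -- B side
  rw [pvB_fold min_x max_x min_y max_y coords (fun _ _ => " ") hbx]
  apply pvGrid_congr
  intro i j hi hi2 hj hj2
  rw [if_pos ⟨hi, hi2⟩, pvLook_eq_get? coords _ hnd]
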